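-- pv_equiv track=rewrite | github.com/liangyirui/leetcode | problems/2684_maximum_number_of_moves_in_a_grid.py | max_moves
-- ===== SOURCE A (Python) =====
-- def max_moves(grid: list[list[int]]) -> int:
--     m, n = len(grid), len(grid[0])
--     prev = [1] * m  # use 1 to indicate the cell is reachable
--     ans = 0
--     for c in range(1, n):
--         dp = [0] * m
--         for r in range(m):
--             if grid[r][c] > grid[r][c - 1] and prev[r] > 0:
--                 dp[r] = max(dp[r], prev[r] + 1)
--             if r > 0 and grid[r][c] > grid[r - 1][c - 1] and prev[r - 1] > 0:
--                 dp[r] = max(dp[r], prev[r - 1] + 1)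
--             if r < m - 1 and grid[r][c] > grid[r + 1][c - 1] and prev[r + 1] > 0:
--                 dp[r] = max(dp[r], prev[r + 1] + 1)
--             ans = max(ans, dp[r] - 1)
--         prev = dp
--     return ans
-- ===== SOURCE B (Python) =====
-- def max_moves(grid: list[list[int]]) -> int:
--     # Right-to-left longest-path table: f[r] = length of the longest strictly
--     # increasing rightward path starting at (r, c); answer = max over column 0, minus 1.
--     m, n = len(grid), len(grid[0])
--     f = [1] * m
--     for c in range(n - 2, -1, -1):
--         f = [1 + max([f[r2] for r2 in (r - 1, r, r + 1)
--                       if 0 <= r2 < m and grid[r2][c + 1] > grid[r][c]] or [0])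
--              for r in range(m)]
--     return max(f) - 1
-- ===== Notes on version B (the rewrite author's own statement) =====
-- stated objective: alternative
-- what changed: A runs a forward column-by-column reachability DP carrying path lengths and a running answer; B fills a right-to-left memo table f(r,c) = longest strictly-increasing rightward path starting at (r,c) and returns max over column 0 minus 1.
import Mathlib
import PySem

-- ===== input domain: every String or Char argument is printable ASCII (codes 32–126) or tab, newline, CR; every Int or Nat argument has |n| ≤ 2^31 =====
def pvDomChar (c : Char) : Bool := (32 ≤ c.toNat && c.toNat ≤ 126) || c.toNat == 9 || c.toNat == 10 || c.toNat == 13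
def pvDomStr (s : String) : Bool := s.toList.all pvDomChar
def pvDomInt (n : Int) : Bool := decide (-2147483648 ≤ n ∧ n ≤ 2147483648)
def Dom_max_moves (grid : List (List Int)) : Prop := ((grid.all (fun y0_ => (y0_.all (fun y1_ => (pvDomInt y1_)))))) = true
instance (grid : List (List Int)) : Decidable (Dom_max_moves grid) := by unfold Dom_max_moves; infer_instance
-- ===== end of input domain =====

-- A runs a forward column-by-column reachability DP with a running answer; B fills a
-- right-to-left memo table f(r,c) = longest strictly increasing rightward path starting
-- at (r,c) and returns the maximum over column 0 minus 1 (alternative algorithm, same cost).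

-- grid[r][c]; Pre_ guarantees indices used are in range, the defaults are never hit there
def pvCell (grid : List (List Int)) (r c : Nat) : Int := (grid.getD r []).getD c 0

-- ===== PORT A =====
def pvRowStep (grid : List (List Int)) (prev : List Int) (c : Nat)
    (st : List Int × Int) (r : Nat) : List Int × Int :=
  let dp := st.1
  let ans := st.2
  let d := dp.getD r 0
  let d := if pvCell grid r c > pvCell grid r (c-1) ∧ prev.getD r 0 > 0 then
             max d (prev.getD r 0 + 1) else d
  let d := if 0 < r ∧ pvCell grid r c > pvCell grid (r-1) (c-1) ∧ prev.getD (r-1) 0 > 0 then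
             max d (prev.getD (r-1) 0 + 1) else d
  let d := if r < grid.length - 1 ∧ pvCell grid r c > pvCell grid (r+1) (c-1) ∧ prev.getD (r+1) 0 > 0 then
             max d (prev.getD (r+1) 0 + 1) else d
  (dp.set r d, max ans (d - 1))

def pvColStep (grid : List (List Int)) (st : List Int × Int) (c : Nat) : List Int × Int :=
  (List.range grid.length).foldl (pvRowStep grid st.1 c) (List.replicate grid.length 0, st.2)

def max_moves (grid : List (List Int)) : Int :=
  ((List.range' 1 ((grid.headD []).length - 1)).foldl (pvColStep grid)
    (List.replicate grid.length 1, 0)).2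

-- ===== PORT B =====
-- f-values of the up-to-three qualifying right neighbours of (r, c):
-- [f[r2] for r2 in (r-1, r, r+1) if 0 <= r2 < m and grid[r2][c+1] > grid[r][c]]
def pvCand (grid : List (List Int)) (f : List Int) (c : Nat) (r : Nat) : List Int :=
  [(r : Int) - 1, (r : Int), (r : Int) + 1].filterMap (fun r2 =>
    if 0 ≤ r2 ∧ r2 < (grid.length : Int) ∧ pvCell grid r2.toNat (c+1) > pvCell grid r c
    then some (f.getD r2.toNat 0) else none)

-- one column of the right-to-left fill: 1 + max(cand or [0])
def pvBStep (grid : List (List Int)) (f : List Int) (c : Nat) : List Int :=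
  (List.range grid.length).map (fun r =>
    1 + ((PySem.List.max? (pvCand grid f c r) (fun y => y)).getD 0))

-- (List.range (n-1)).reverse is Python's range(n-2, -1, -1); under Pre_ the grid is
-- nonempty so f ≠ [] and Python's max(f) never raises (the `.getD 0` is unreachable there)
def max_moves_alt (grid : List (List Int)) : Int :=
  let f := ((List.range ((grid.headD []).length - 1)).reverse).foldl
    (pvBStep grid) (List.replicate grid.length 1)
  (PySem.List.max? f (fun y => y)).getD 0 - 1

-- ===== PRECONDITION & SPEC =====
-- Pre_ excludes exactly the inputs where Python raises IndexError: the empty grid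
-- (grid[0]), and grids with ≥ 2 columns in which some row is shorter than row 0.
def Pre_max_moves (grid : List (List Int)) : Prop :=
  grid ≠ [] ∧ ((grid.headD []).length ≤ 1 ∨ ∀ row ∈ grid, (grid.headD []).length ≤ row.length)
instance (grid : List (List Int)) : Decidable (Pre_max_moves grid) := by
  unfold Pre_max_moves; infer_instance
def pvWitness_max_moves : List (List Int) := [[1, 5], [3, 4]]

def Spec_max_moves (grid : List (List Int)) (out : Int) : Prop := out = max_moves_alt grid
instance (grid : List (List Int)) (out : Int) : Decidable (Spec_max_moves grid out) := by
  unfold Spec_max_moves; infer_instance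

-- ===== CLAIM (what is proved, stated in full; the proofs are below) =====
def Claim_equal_max_moves : Prop := ∀ (grid : List (List Int)), Dom_max_moves grid → Pre_max_moves grid → Spec_max_moves grid (max_moves grid)

-- ===== LEMMAS AND PROOFS =====

-- proof-side intermediate: row r is reachable in column c iff some qualifying
-- left neighbour is reachable in column c-1
def pvBCond (grid : List (List Int)) (reach : List Bool) (c : Nat) (i : Nat) : Bool :=
  (reach.getD i false && decide (pvCell grid i c > pvCell grid i (c-1)))
  || (decide (0 < i) && reach.getD (i-1) false && decide (pvCell grid i c > pvCell grid (i-1) (c-1)))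
  || (decide (i+1 < grid.length) && reach.getD (i+1) false && decide (pvCell grid i c > pvCell grid (i+1) (c-1)))

-- proof-side intermediate: A's answer as "deepest reachable column", with early exit
def pvAltLoop (grid : List (List Int)) : Nat → Nat → List Bool → Int → Int
  | 0, _, _, best => best
  | fuel+1, c, reach, best =>
    let nxt := (List.range grid.length).map (pvBCond grid reach c)
    if nxt.any id then pvAltLoop grid fuel (c+1) nxt (c : Int)
    else best

lemma pv_getD_set (l : List Int) (i j : Nat) (a : Int) (h : i < l.length) :
    (l.set i a).getD j 0 = if i = j then a else l.getD j 0 := by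
  rcases eq_or_ne i j with rfl|hne
  · simp [List.getD_eq_getElem?_getD, List.getElem?_set_self h]
  · simp [List.getD_eq_getElem?_getD, List.getElem?_set_ne hne, hne]

lemma pv_getD_rep_int (m j : Nat) (a : Int) :
    (List.replicate m a).getD j 0 = if j < m then a else 0 := by
  simp only [List.getD_eq_getElem?_getD, List.getElem?_replicate]
  split_ifs <;> rfl

lemma pv_getD_rep_true (m j : Nat) :
    (List.replicate m true).getD j false = decide (j < m) := by
  simp only [List.getD_eq_getElem?_getD, List.getElem?_replicate]
  split_ifs with h <;> simp [h]

lemma pv_getD_rep_false (m j : Nat) :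
    (List.replicate m false).getD j false = false := by
  simp only [List.getD_eq_getElem?_getD, List.getElem?_replicate]
  split_ifs <;> rfl

set_option maxHeartbeats 1600000 in
-- one row of A's inner loop, expressed through the reachability condition
lemma pv_row_d (grid : List (List Int)) (prev : List Int) (reach : List Bool)
    (c s : Nat) (dp : List Int) (ans : Int) (hc : 1 ≤ c)
    (hp : ∀ j, prev.getD j 0 = if reach.getD j false then (c : Int) else 0)
    (hdp : dp.getD s 0 = 0) (hans : 0 ≤ ans) :
    pvRowStep grid prev c (dp, ans) s =
      (dp.set s (if pvBCond grid reach c s then (c : Int) + 1 else 0),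
       if pvBCond grid reach c s then max ans (c : Int) else ans) := by
  have hc' : (0 : Int) < (c : Nat) := by exact_mod_cast hc
  have hc0 : 0 < c := hc
  have hm1 : max (0:Int) ((c:Int)+1) = (c:Int)+1 := by omega
  have hm3 : max ans (-1:Int) = ans := by omega
  have hg : (s < grid.length - 1) = (s + 1 < grid.length) := propext (by omega)
  simp only [pvRowStep, hdp, hp, hg, pvBCond]
  by_cases h1 : reach[s]?.getD false = true <;>
    by_cases h2 : reach[s-1]?.getD false = true <;>
      by_cases h3 : reach[s+1]?.getD false = true <;>
        by_cases c1 : pvCell grid s c > pvCell grid s (c-1) <;>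
          by_cases c2 : pvCell grid s c > pvCell grid (s-1) (c-1) <;>
            by_cases c3 : pvCell grid s c > pvCell grid (s+1) (c-1) <;>
              by_cases g2 : 0 < s <;>
                by_cases g3 : s + 1 < grid.length <;>
                  simp [h1, h2, h3, c1, c2, c3, g2, g3, hc0, hm1, hm3]

-- A's whole inner loop over a row range, against the reachability condition vector
lemma pv_inner (grid : List (List Int)) (c : Nat) (reach : List Bool) (prev : List Int)
    (hc : 1 ≤ c)
    (hp : ∀ j, prev.getD j 0 = if reach.getD j false then (c : Int) else 0) :
    ∀ (t s : Nat) (dp : List Int) (ans : Int),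
      s + t ≤ grid.length → dp.length = grid.length →
      (∀ r, s ≤ r → dp.getD r 0 = 0) → 0 ≤ ans →
      ((List.range' s t).foldl (pvRowStep grid prev c) (dp, ans)).1.length = grid.length ∧
      (∀ j, ((List.range' s t).foldl (pvRowStep grid prev c) (dp, ans)).1.getD j 0 =
        if s ≤ j ∧ j < s + t then (if pvBCond grid reach c j then (c : Int) + 1 else 0)
        else dp.getD j 0) ∧
      ((List.range' s t).foldl (pvRowStep grid prev c) (dp, ans)).2 =
        (if (List.range' s t).any (pvBCond grid reach c) then max ans (c : Int) else ans) := by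
  intro t
  induction t with
  | zero =>
    intro s dp ans _ hlen _ _
    refine ⟨hlen, fun j => ?_, by simp⟩
    rw [if_neg (by omega)]
    rfl
  | succ t ih =>
    intro s dp ans hst hlen hzero hans
    rw [List.range'_succ]
    simp only [List.foldl_cons, List.any_cons]
    rw [pv_row_d grid prev reach c s dp ans hc hp (hzero s le_rfl) hans]
    have hsm : s < dp.length := by omega
    obtain ⟨ihl, ihd, iha⟩ := ih (s+1)
      (dp.set s (if pvBCond grid reach c s then (c : Int) + 1 else 0))
      (if pvBCond grid reach c s then max ans (c : Int) else ans)
      (by omega) (by simpa using hlen)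
      (fun r hr => by
        rw [pv_getD_set dp s r _ hsm, if_neg (by omega)]
        exact hzero r (by omega))
      (by split_ifs <;> [exact le_max_of_le_left hans; exact hans])
    refine ⟨ihl, fun j => ?_, ?_⟩
    · rw [ihd j, pv_getD_set dp s j _ hsm]
      by_cases hj : s = j
      · subst hj; split_ifs <;> first | rfl | omega
      · split_ifs <;> first | rfl | omega
    · rw [iha]
      by_cases hb : pvBCond grid reach c s = true <;>
        by_cases hr : (List.range' (s+1) t).any (pvBCond grid reach c) = true <;>
          simp [hb, hr]

-- pvAltLoop returns best immediately once no row is reachable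
lemma pv_dead (grid : List (List Int)) (t c : Nat) (best : Int) :
    pvAltLoop grid t c (List.replicate grid.length false) best = best := by
  cases t with
  | zero => rfl
  | succ t =>
    have hb : ∀ i, pvBCond grid (List.replicate grid.length false) c i = false := by
      intro i; simp [pvBCond]
    simp [pvAltLoop, hb]

-- nxt.getD through map/range
lemma pv_getD_nxt (grid : List (List Int)) (reach : List Bool) (c j : Nat) :
    (((List.range grid.length).map (pvBCond grid reach c)).getD j false) =
      if j < grid.length then pvBCond grid reach c j else false := by
  by_cases h : j < grid.length
  · rw [if_pos h]; exact PySem.List.getD_map_range _ _ _ _ h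
  · rw [if_neg h]
    apply List.getD_eq_default
    simpa using (by omega : grid.length ≤ j)

-- A-side simulation: A's column fold equals pvAltLoop under the reachability invariant
lemma pv_outer (grid : List (List Int)) :
    ∀ (t c : Nat) (prev : List Int) (reach : List Bool) (ans : Int),
      1 ≤ c → prev.length = grid.length → reach.length = grid.length →
      (∀ j, prev.getD j 0 = if reach.getD j false then (c : Int) else 0) →
      0 ≤ ans → ans ≤ (c : Int) - 1 →
      ((List.range' c t).foldl (pvColStep grid) (prev, ans)).2 = pvAltLoop grid t c reach ans := by
  intro t
  induction t with
  | zero => intro c prev reach ans _ _ _ _ _ _; simp [pvAltLoop]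
  | succ t ih =>
    intro c prev reach ans hc hpl hrl hp hans hansc
    have hcz : (0 : Int) < (c : Nat) := by exact_mod_cast hc
    rw [List.range'_succ, List.foldl_cons]
    obtain ⟨hl, hd, ha⟩ := pv_inner grid c reach prev hc hp grid.length 0
      (List.replicate grid.length 0) ans (by omega) (by simp)
      (fun r _ => by rw [pv_getD_rep_int]; split_ifs <;> rfl) hans
    have hcol : pvColStep grid (prev, ans) c =
        (List.range' 0 grid.length).foldl (pvRowStep grid prev c)
          (List.replicate grid.length 0, ans) := by
      simp [pvColStep, List.range_eq_range']
    have hany : (((List.range grid.length).map (pvBCond grid reach c)).any id) =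
        (List.range' 0 grid.length).any (pvBCond grid reach c) := by
      simp [List.range_eq_range']
    cases h : (List.range' 0 grid.length).any (pvBCond grid reach c) with
    | true =>
      have hB : pvAltLoop grid (t+1) c reach ans =
          pvAltLoop grid t (c+1) ((List.range grid.length).map (pvBCond grid reach c)) (c : Int) := by
        simp only [pvAltLoop]
        rw [if_pos (by rw [hany, h])]
      rw [hB, hcol]
      have h2 : ((List.range' 0 grid.length).foldl (pvRowStep grid prev c)
          (List.replicate grid.length 0, ans)).2 = (c : Int) := by
        rw [ha, if_pos h]; exact max_eq_right (by omega)
      have := ih (c+1)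
        ((List.range' 0 grid.length).foldl (pvRowStep grid prev c)
          (List.replicate grid.length 0, ans)).1
        ((List.range grid.length).map (pvBCond grid reach c)) (c : Int)
        (by omega) hl (by simp)
        (fun j => by
          rw [hd j, pv_getD_nxt]
          by_cases hj : j < grid.length
          · rw [if_pos hj, if_pos (by omega)]; push_cast; rfl
          · rw [if_neg hj, if_neg (by omega), pv_getD_rep_int, if_neg hj]; simp)
        (by omega) (by push_cast; omega)
      rw [← this]
      rcases hfold : (List.range' 0 grid.length).foldl (pvRowStep grid prev c)
          (List.replicate grid.length 0, ans) with ⟨dp', ans'⟩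
      rw [hfold] at h2
      simp only at h2
      rw [h2]
    | false =>
      have hB : pvAltLoop grid (t+1) c reach ans = ans := by
        simp only [pvAltLoop]
        rw [if_neg (by rw [hany, h]; exact Bool.false_ne_true)]
      rw [hB, hcol]
      have hzero' : ∀ j, ((List.range' 0 grid.length).foldl (pvRowStep grid prev c)
          (List.replicate grid.length 0, ans)).1.getD j 0 = 0 := by
        intro j
        rw [hd j]
        by_cases hj : j < grid.length
        · rw [if_pos (by omega)]
          have hfb : ¬ pvBCond grid reach c j = true :=
            List.any_eq_false.mp h j (by rw [← List.range_eq_range']; exact List.mem_range.mpr hj)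
          simp [hfb]
        · rw [if_neg (by omega), pv_getD_rep_int, if_neg hj]
      rcases hfold : (List.range' 0 grid.length).foldl (pvRowStep grid prev c)
          (List.replicate grid.length 0, ans) with ⟨dp', ans'⟩
      rw [hfold] at hzero' hl ha
      simp only at hzero' hl ha
      have h2 : ans' = ans := by rw [ha, if_neg (by simp [h])]
      subst h2
      have := ih (c+1) dp' (List.replicate grid.length false) ans'
        (by omega) hl (by simp)
        (fun j => by rw [hzero' j, pv_getD_rep_false]; simp)
        hans (by push_cast; omega)
      rw [this, pv_dead]

-- ======== B-side development: the backward table vs pvAltLoop ========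

-- the table B holds after processing columns c, c+1, …, c+t-1 (right to left)
def pvFvec (grid : List (List Int)) : Nat → Nat → List Int
  | 0, _ => List.replicate grid.length 1
  | t+1, c => pvBStep grid (pvFvec grid (t) (c+1)) c

lemma pv_fold_fvec (grid : List (List Int)) :
    ∀ (t c : Nat), ((List.range' c t).reverse).foldl (pvBStep grid) (List.replicate grid.length 1)
      = pvFvec grid t c := by
  intro t
  induction t with
  | zero => intro c; rfl
  | succ t ih =>
    intro c
    rw [List.range'_succ, List.reverse_cons, List.foldl_append, ih (c+1)]
    rfl

lemma pvFvec_len (grid : List (List Int)) (t c : Nat) :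
    (pvFvec grid t c).length = grid.length := by
  cases t with
  | zero => simp [pvFvec]
  | succ t => simp [pvFvec, pvBStep]

lemma pvCand_mem_shape (grid : List (List Int)) (f : List Int) (c r : Nat) (x : Int)
    (hx : x ∈ pvCand grid f c r) :
    ∃ i : Nat, i < grid.length ∧ r ≤ i + 1 ∧ i ≤ r + 1 ∧
      pvCell grid i (c+1) > pvCell grid r c ∧ x = f.getD i 0 := by
  simp only [pvCand, List.mem_filterMap, List.mem_cons] at hx
  obtain ⟨r2, hr2, hif⟩ := hx
  split_ifs at hif with hcond
  · obtain ⟨h0, hm, hcell⟩ := hcond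
    have hmem3 : r2 = (r : Int) - 1 ∨ r2 = (r : Int) ∨ r2 = (r : Int) + 1 := by
      simpa using hr2
    have h1 : r ≤ r2.toNat + 1 := by rcases hmem3 with h|h|h <;> omega
    have h2 : r2.toNat ≤ r + 1 := by rcases hmem3 with h|h|h <;> omega
    exact ⟨r2.toNat, by omega, h1, h2, hcell, (Option.some.inj hif).symm⟩

lemma pvCand_mem_of (grid : List (List Int)) (f : List Int) (c r : Nat) (i : Nat)
    (him : i < grid.length) (h1 : r ≤ i + 1) (h2 : i ≤ r + 1)
    (hcell : pvCell grid i (c+1) > pvCell grid r c) :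
    f.getD i 0 ∈ pvCand grid f c r := by
  simp only [pvCand, List.mem_filterMap]
  refine ⟨(i : Int), by simp only [List.mem_cons]; omega, ?_⟩
  rw [if_pos ⟨by omega, by omega, by simpa using hcell⟩]
  simp

-- the rows with a true flag, as a finset
def pvSetR (reach : List Bool) (m : Nat) : Finset Nat :=
  (Finset.range m).filter (fun j => reach.getD j false = true)

-- max f-value over the flagged rows (0 if none)
def pvSup (reach : List Bool) (f : List Int) (m : Nat) : Nat :=
  (pvSetR reach m).sup (fun j => (f.getD j 0).toNat)

-- qualifying right neighbours of (j, c)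
def pvSucc (grid : List (List Int)) (c j : Nat) : Finset Nat :=
  (Finset.range grid.length).filter
    (fun i => j ≤ i + 1 ∧ i ≤ j + 1 ∧ pvCell grid i (c+1) > pvCell grid j c)

lemma pv_candmax_nonneg (grid : List (List Int)) (f : List Int) (c r : Nat)
    (hnn : ∀ i, 0 ≤ f.getD i 0) :
    0 ≤ (PySem.List.max? (pvCand grid f c r) (fun y => y)).getD 0 := by
  cases h : PySem.List.max? (pvCand grid f c r) (fun y => y) with
  | none => simp
  | some v =>
    obtain ⟨i, _, _, _, _, hv⟩ := pvCand_mem_shape grid f c r v (PySem.List.max?_mem h)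
    simpa [hv] using hnn i

lemma pv_candmax_sup (grid : List (List Int)) (f : List Int) (c r : Nat) :
    ((PySem.List.max? (pvCand grid f c r) (fun y => y)).getD 0).toNat
      = (pvSucc grid c r).sup (fun i => (f.getD i 0).toNat) := by
  apply Nat.le_antisymm
  · cases h : PySem.List.max? (pvCand grid f c r) (fun y => y) with
    | none => simp
    | some v =>
      obtain ⟨i, him, h1, h2, hcell, hv⟩ := pvCand_mem_shape grid f c r v (PySem.List.max?_mem h)
      have : i ∈ pvSucc grid c r := by
        simp only [pvSucc, Finset.mem_filter, Finset.mem_range]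
        exact ⟨him, h1, h2, hcell⟩
      simpa [hv] using Finset.le_sup (f := fun i => (f.getD i 0).toNat) this
  · apply Finset.sup_le
    intro i hi
    simp only [pvSucc, Finset.mem_filter, Finset.mem_range] at hi
    obtain ⟨him, h1, h2, hcell⟩ := hi
    have hmem := pvCand_mem_of grid f c r i him h1 h2 hcell
    cases h : PySem.List.max? (pvCand grid f c r) (fun y => y) with
    | none => exact absurd ((PySem.List.max?_eq_none_iff _ _).mp h ▸ hmem) (by simp)
    | some v =>
      have := PySem.List.max?_isMax h _ hmem
      simp only [Option.getD_some]
      exact Int.toNat_le_toNat this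

lemma pv_setR_nxt (grid : List (List Int)) (reach : List Bool) (c : Nat)
    (hlen : reach.length = grid.length) :
    pvSetR ((List.range grid.length).map (pvBCond grid reach (c+1))) grid.length
      = (pvSetR reach grid.length).biUnion (pvSucc grid c) := by
  ext i
  simp only [pvSetR, pvSucc, Finset.mem_biUnion, Finset.mem_filter, Finset.mem_range]
  constructor
  · rintro ⟨him, hB⟩
    rw [PySem.List.getD_map_range _ _ _ _ him] at hB
    simp only [pvBCond, Nat.add_sub_cancel, Bool.or_eq_true, Bool.and_eq_true,
      decide_eq_true_eq] at hB
    rcases hB with (⟨hr, hc⟩ | ⟨⟨hi, hr⟩, hc⟩) | ⟨⟨hi, hr⟩, hc⟩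
    · have hjm : i < reach.length := by
        by_contra hcon
        rw [List.getD_eq_default _ _ (by omega)] at hr; exact absurd hr (by simp)
      exact ⟨i, ⟨by omega, hr⟩, him, by omega, by omega, hc⟩
    · exact ⟨i - 1, ⟨by omega, hr⟩, him, by omega, by omega, hc⟩
    · exact ⟨i + 1, ⟨by omega, hr⟩, him, by omega, by omega, hc⟩
  · rintro ⟨j, ⟨hjm, hjr⟩, him, h1, h2, hcell⟩
    refine ⟨him, ?_⟩
    rw [PySem.List.getD_map_range _ _ _ _ him]
    simp only [pvBCond, Nat.add_sub_cancel, Bool.or_eq_true, Bool.and_eq_true,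
      decide_eq_true_eq]
    rcases (by omega : j = i ∨ (0 < i ∧ j = i - 1) ∨ j = i + 1) with rfl | ⟨hi0, rfl⟩ | rfl
    · exact Or.inl (Or.inl ⟨hjr, hcell⟩)
    · exact Or.inl (Or.inr ⟨⟨hi0, hjr⟩, hcell⟩)
    · exact Or.inr ⟨⟨hjm, hjr⟩, hcell⟩

lemma pv_setR_nonempty (reach : List Bool) (m : Nat) (hlen : reach.length = m)
    (hany : reach.any id = true) : (pvSetR reach m).Nonempty := by
  obtain ⟨b, hb, hbt⟩ := List.any_eq_true.mp hany
  obtain ⟨j, hj, hval⟩ := List.mem_iff_getElem.mp hb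
  refine ⟨j, ?_⟩
  simp only [pvSetR, Finset.mem_filter, Finset.mem_range]
  refine ⟨by omega, ?_⟩
  rw [List.getD_eq_getElem?_getD, List.getElem?_eq_getElem hj]
  simp only [Option.getD_some, hval]
  simpa using hbt

-- the crux: one backward step of B raises the flagged max by exactly one
lemma pv_sup_bstep (grid : List (List Int)) (reach : List Bool) (f : List Int) (c : Nat)
    (hlen : reach.length = grid.length) (hany : reach.any id = true)
    (hnn : ∀ i, 0 ≤ f.getD i 0) :
    pvSup reach (pvBStep grid f c) grid.length
      = 1 + pvSup ((List.range grid.length).map (pvBCond grid reach (c+1))) f grid.length := by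
  have hne := pv_setR_nonempty reach grid.length hlen hany
  have hstep : ∀ j ∈ pvSetR reach grid.length,
      ((pvBStep grid f c).getD j 0).toNat = 1 + (pvSucc grid c j).sup (fun i => (f.getD i 0).toNat) := by
    intro j hj
    have hjm : j < grid.length := by
      simpa using (Finset.mem_filter.mp hj).1
    rw [pvBStep, PySem.List.getD_map_range _ _ _ _ hjm, ← pv_candmax_sup grid f c j]
    have := pv_candmax_nonneg grid f c j hnn
    omega
  unfold pvSup
  rw [Finset.sup_congr rfl hstep, pv_setR_nxt grid reach c hlen, Finset.sup_biUnion]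
  apply Nat.le_antisymm
  · apply Finset.sup_le
    intro j hj
    have : (pvSucc grid c j).sup (fun i => (f.getD i 0).toNat)
        ≤ (pvSetR reach grid.length).sup (fun j => (pvSucc grid c j).sup (fun i => (f.getD i 0).toNat)) :=
      Finset.le_sup (f := fun j => (pvSucc grid c j).sup (fun i => (f.getD i 0).toNat)) hj
    omega
  · obtain ⟨j, hj, hval⟩ := Finset.exists_mem_eq_sup (pvSetR reach grid.length) hne
      (fun j => (pvSucc grid c j).sup (fun i => (f.getD i 0).toNat))
    rw [hval]
    exact Finset.le_sup (f := fun j => 1 + (pvSucc grid c j).sup (fun i => (f.getD i 0).toNat)) hj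

lemma pv_getD_mem (l : List Int) (i : Nat) (h : i < l.length) : l.getD i 0 ∈ l := by
  rw [List.getD_eq_getElem?_getD, List.getElem?_eq_getElem h]
  exact List.getElem_mem h

lemma pvFvec_pos (grid : List (List Int)) :
    ∀ (t c : Nat) (x : Int), x ∈ pvFvec grid t c → 1 ≤ x := by
  intro t
  induction t with
  | zero => intro c x hx; simp [pvFvec] at hx; omega
  | succ t ih =>
    intro c x hx
    simp only [pvFvec, pvBStep, List.mem_map, List.mem_range] at hx
    obtain ⟨r, _, hx⟩ := hx
    have hnn : ∀ i, 0 ≤ (pvFvec grid t (c+1)).getD i 0 := by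
      intro i
      by_cases hi : i < (pvFvec grid t (c+1)).length
      · exact le_trans (by norm_num) (ih (c+1) _ (pv_getD_mem _ _ hi))
      · rw [List.getD_eq_default _ _ (by omega)]
    have := pv_candmax_nonneg grid (pvFvec grid t (c+1)) c r hnn
    omega

lemma pvFvec_getD_nonneg (grid : List (List Int)) (t c : Nat) :
    ∀ i, 0 ≤ (pvFvec grid t c).getD i 0 := by
  intro i
  by_cases hi : i < (pvFvec grid t c).length
  · exact le_trans (by norm_num) (pvFvec_pos grid t c _ (pv_getD_mem _ _ hi))
  · rw [List.getD_eq_default _ _ (by omega)]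

-- backward induction: the flagged max of B's table computes pvAltLoop's answer
lemma pv_back (grid : List (List Int)) :
    ∀ (t c : Nat) (reach : List Bool), reach.length = grid.length → reach.any id = true →
      (pvSup reach (pvFvec grid t c) grid.length : Int)
        = pvAltLoop grid t (c+1) reach c - c + 1 := by
  intro t
  induction t with
  | zero =>
    intro c reach hlen hany
    have hne := pv_setR_nonempty reach grid.length hlen hany
    have h1 : pvSup reach (pvFvec grid 0 c) grid.length = 1 := by
      unfold pvSup
      rw [Finset.sup_congr rfl (fun j hj => ?_), Finset.sup_const hne 1]
      have hjm : j < grid.length := by simpa using (Finset.mem_filter.mp hj).1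
      simp [pvFvec, hjm]
    rw [h1]
    simp [pvAltLoop]
  | succ t ih =>
    intro c reach hlen hany
    have hnn := pvFvec_getD_nonneg grid t (c+1)
    have hcrux := pv_sup_bstep grid reach (pvFvec grid t (c+1)) c hlen hany hnn
    have hloop : pvAltLoop grid (t+1) (c+1) reach c =
        (if ((List.range grid.length).map (pvBCond grid reach (c+1))).any id then
          pvAltLoop grid t (c+1+1) ((List.range grid.length).map (pvBCond grid reach (c+1))) ((c:Int)+1)
        else (c : Int)) := by
      simp only [pvAltLoop]
      push_cast
      rfl
    cases h : ((List.range grid.length).map (pvBCond grid reach (c+1))).any id with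
    | true =>
      have hIH := ih (c+1) ((List.range grid.length).map (pvBCond grid reach (c+1)))
        (by simp) h
      rw [hloop, if_pos h]
      show (pvSup reach (pvBStep grid (pvFvec grid t (c+1)) c) grid.length : Int) = _
      rw [hcrux]
      push_cast
      push_cast at hIH
      omega
    | false =>
      have hz : pvSup ((List.range grid.length).map (pvBCond grid reach (c+1)))
          (pvFvec grid t (c+1)) grid.length = 0 := by
        unfold pvSup
        have : pvSetR ((List.range grid.length).map (pvBCond grid reach (c+1))) grid.length = ∅ := by
          rw [Finset.eq_empty_iff_forall_notMem]
          intro i hi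
          simp only [pvSetR, Finset.mem_filter, Finset.mem_range] at hi
          obtain ⟨him, hval⟩ := hi
          rw [PySem.List.getD_map_range _ _ _ _ him] at hval
          have := List.any_eq_false.mp h (pvBCond grid reach (c+1) i)
            (List.mem_map.mpr ⟨i, List.mem_range.mpr him, rfl⟩)
          simp [hval] at this
        rw [this]; rfl
      rw [hloop, if_neg (by simp [h])]
      show (pvSup reach (pvBStep grid (pvFvec grid t (c+1)) c) grid.length : Int) = _
      rw [hcrux, hz]
      push_cast
      omega

-- Python's max(f) over the whole table, as the flagged max with the all-true flags
lemma pv_max?_sup (f : List Int) (hne : f ≠ []) (hpos : ∀ x ∈ f, 1 ≤ x) :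
    (PySem.List.max? f (fun y => y)).getD 0
      = (((Finset.range f.length).sup (fun j => (f.getD j 0).toNat) : Nat) : Int) := by
  cases h : PySem.List.max? f (fun y => y) with
  | none => exact absurd ((PySem.List.max?_eq_none_iff _ _).mp h) hne
  | some v =>
    have hvmem := PySem.List.max?_mem h
    have hvpos : 1 ≤ v := hpos v hvmem
    simp only [Option.getD_some]
    apply le_antisymm
    · obtain ⟨j, hj, hval⟩ := List.mem_iff_getElem.mp hvmem
      have hgd : f.getD j 0 = v := by
        rw [List.getD_eq_getElem?_getD, List.getElem?_eq_getElem hj, Option.getD_some, hval]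
      have hle : (f.getD j 0).toNat ≤ (Finset.range f.length).sup (fun j => (f.getD j 0).toNat) :=
        Finset.le_sup (f := fun j => (f.getD j 0).toNat) (Finset.mem_range.mpr hj)
      calc v = ((f.getD j 0).toNat : Int) := by rw [hgd]; omega
        _ ≤ _ := by exact_mod_cast hle
    · have : (Finset.range f.length).sup (fun j => (f.getD j 0).toNat) ≤ v.toNat := by
        apply Finset.sup_le
        intro j hj
        have hjlt := Finset.mem_range.mp hj
        have : f.getD j 0 ∈ f := by
          rw [List.getD_eq_getElem?_getD, List.getElem?_eq_getElem hjlt]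
          exact List.getElem_mem hjlt
        exact Int.toNat_le_toNat (PySem.List.max?_isMax h _ this)
      omega

lemma pv_setR_all (m : Nat) : pvSetR (List.replicate m true) m = Finset.range m := by
  ext j
  simp only [pvSetR, Finset.mem_filter, Finset.mem_range, pv_getD_rep_true]
  constructor
  · exact fun hj => hj.1
  · exact fun hj => ⟨hj, by simpa using hj⟩

-- ===== VERDICT (by name: the statement is the Claim_ definition above) =====
theorem max_moves_spec : Claim_equal_max_moves := by
  intro grid _ hpre
  obtain ⟨hgne, -⟩ := hpre
  have hm : 0 < grid.length := List.length_pos_iff.mpr hgne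
  unfold Spec_max_moves max_moves max_moves_alt
  have hA := pv_outer grid ((grid.headD []).length - 1) 1 (List.replicate grid.length 1)
    (List.replicate grid.length true) 0 le_rfl (by simp) (by simp)
    (fun j => by
      rw [pv_getD_rep_int, pv_getD_rep_true]
      by_cases hj : j < grid.length <;> simp [hj])
    le_rfl (by norm_num)
  rw [hA]
  have hfold : ((List.range ((grid.headD []).length - 1)).reverse).foldl (pvBStep grid)
      (List.replicate grid.length 1) = pvFvec grid ((grid.headD []).length - 1) 0 := by
    rw [List.range_eq_range']
    exact pv_fold_fvec grid _ 0
  simp only [hfold]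
  have hany : (List.replicate grid.length true).any id = true := by
    apply List.any_eq_true.mpr
    exact ⟨true, List.mem_replicate.mpr ⟨by omega, rfl⟩, rfl⟩
  have hB := pv_back grid ((grid.headD []).length - 1) 0 (List.replicate grid.length true)
    (by simp) hany
  have hflen : (pvFvec grid ((grid.headD []).length - 1) 0).length = grid.length :=
    pvFvec_len grid _ 0
  have hmax := pv_max?_sup (pvFvec grid ((grid.headD []).length - 1) 0)
    (by rw [← List.length_pos_iff, hflen]; exact hm)
    (pvFvec_pos grid _ 0)
  rw [hmax, hflen]
  rw [pvSup, pv_setR_all grid.length] at hB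
  rw [hB]
  push_cast
  ring
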